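-- pv_equiv track=rewrite | github.com/bmykhaylivvv/puzzle_game | puzzle_game.py | repeat_check
-- ===== SOURCE A (Python) =====
-- def remove_stars(char):
--     if char != '*' and char != ' ':
--         return True
--     else:
--         return False
--
-- def repeat_check(lst):
--     """
--     Fuction checks if there are repeatable characters in rows, columns or
--     sections with the same color
--     >>> repeat_check([['*', '*', '*', '*', ' ', ' ', '3', ' ', ' '],\
--                       ['*', '*', '*', ' ', ' ', '6', ' ', ' ', ' '],\
--                       ['*', '*', ' ', '4', ' ', ' ', ' ', '8', '2'],\
--                       ['*', '1', ' ', ' ', ' ', ' ', ' ', ' ', ' '],\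
--                       [' ', ' ', '3', '1', ' ', '8', '2', ' ', ' '],\
--                       ['*', '*', '*', '*', '9', '2', ' ', '1', '*'],\
--                       ['*', '*', '*', '*', ' ', ' ', ' ', '*', '*'],\
--                       ['*', '*', '*', '*', '5', ' ', '*', '*', '*'],\
--                       ['*', '*', '*', '*', ' ', '*', '*', '*', '*']])
--     True
--     """
--     new_lines = []
--     for line in lst:
--         new_line = list(filter(remove_stars, line))
--         new_lines.append(new_line)
--
--     for ln in new_lines:
--         if len(ln) != len(set(ln)):
--             return False
--     return True
-- ===== SOURCE B (Python) =====
-- def repeat_check(lst):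
--     for row in lst:
--         seen = set()
--         for ch in row:
--             if ch == '*' or ch == ' ':
--                 continue
--             if ch in seen:
--                 return False
--             seen.add(ch)
--     return True
-- ===== Notes on version B (the rewrite author's own statement) =====
-- stated objective: simpler
-- what changed: Replaced A's two-pass scheme (build a list of filtered rows, then compare each row's length with the length of its set) by a single incremental scan: one loop per row with a growing seen-set that skips '*' and ' ' and returns False at the first repeated character.
import Mathlib
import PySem

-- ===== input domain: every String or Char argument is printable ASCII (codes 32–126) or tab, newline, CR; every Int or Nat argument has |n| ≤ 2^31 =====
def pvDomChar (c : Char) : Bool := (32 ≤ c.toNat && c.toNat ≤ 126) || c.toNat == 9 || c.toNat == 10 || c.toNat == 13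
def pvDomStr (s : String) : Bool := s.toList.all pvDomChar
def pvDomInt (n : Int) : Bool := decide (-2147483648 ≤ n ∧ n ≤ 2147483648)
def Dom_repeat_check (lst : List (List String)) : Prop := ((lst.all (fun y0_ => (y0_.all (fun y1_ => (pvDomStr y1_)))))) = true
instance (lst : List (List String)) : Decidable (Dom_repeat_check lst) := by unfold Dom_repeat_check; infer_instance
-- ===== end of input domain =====

-- B replaces A's two passes (filter every row into new_lines, then compare len(row) with
-- len(set(row))) by one incremental scan per row with a seen-set and early exit; objective: simpler.

-- ===== PORT A =====
def remove_stars (char : String) : Bool :=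
  if char != "*" && char != " " then true else false

-- A's second loop: 'for ln in new_lines: if len(ln) != len(set(ln)): return False' then 'return True'
def pvCheckRows : List (List String) → Bool
  | [] => true
  | ln :: rest => if ln.length ≠ (PySem.Set.ofList ln).length then false else pvCheckRows rest

def repeat_check (lst : List (List String)) : Bool :=
  let new_lines := lst.foldl (fun acc line => acc ++ [line.filter remove_stars]) []
  pvCheckRows new_lines

-- ===== PORT B =====
-- B's inner loop over one row: skip '*'/' ', return False on a repeat, else add to seen
def pvRowScan : List String → PySem.Set String → Bool
  | [], _ => true
  | ch :: rest, seen =>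
    if ch == "*" || ch == " " then pvRowScan rest seen
    else if PySem.Set.contains seen ch then false
    else pvRowScan rest (PySem.Set.add seen ch)

-- B's outer loop over the rows
def pvRowsScan : List (List String) → Bool
  | [] => true
  | row :: rows => if pvRowScan row PySem.Set.empty then pvRowsScan rows else false

def repeat_check_alt (lst : List (List String)) : Bool :=
  pvRowsScan lst

-- ===== PRECONDITION & SPEC =====
def Spec_repeat_check (lst : List (List String)) (out : Bool) : Prop := out = repeat_check_alt lst
instance (lst : List (List String)) (out : Bool) : Decidable (Spec_repeat_check lst out) := by unfold Spec_repeat_check; infer_instance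

-- ===== CLAIM (what is proved, stated in full; the proofs are below) =====
def Claim_equal_repeat_check : Prop := ∀ (lst : List (List String)), Dom_repeat_check lst → Spec_repeat_check lst (repeat_check lst)

-- ===== LEMMAS AND PROOFS =====

theorem pv_foldl_add_length_le (l s : List String) :
    (l.foldl PySem.Set.add s).length ≤ s.length + l.length := by
  induction l generalizing s with
  | nil => simp
  | cons x l ih =>
    have h1 : (PySem.Set.add s x).length ≤ s.length + 1 := by
      unfold PySem.Set.add
      split_ifs <;> simp
    have := ih (PySem.Set.add s x)
    simp only [List.foldl_cons, List.length_cons]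
    omega

theorem pv_foldl_add_length_eq_iff (l s : List String) (hs : s.Nodup) :
    (l.foldl PySem.Set.add s).length = s.length + l.length ↔ (s ++ l).Nodup := by
  induction l generalizing s with
  | nil => simpa using hs
  | cons x l ih =>
    simp only [List.foldl_cons]
    by_cases hx : x ∈ s
    · have hadd : PySem.Set.add s x = s := by
        unfold PySem.Set.add PySem.Set.contains
        simp [hx]
      rw [hadd]
      have hle := pv_foldl_add_length_le l s
      constructor
      · intro h
        exfalso
        simp only [List.length_cons] at h
        omega
      · intro h
        exact absurd rfl (((List.nodup_append.mp h).2.2) x hx x List.mem_cons_self)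
    · have hadd : PySem.Set.add s x = s ++ [x] := by
        unfold PySem.Set.add PySem.Set.contains
        simp [hx]
      rw [hadd]
      have hs' : (s ++ [x]).Nodup := by
        refine List.Nodup.append hs (by simp) ?_
        intro a ha hax
        simp only [List.mem_singleton] at hax
        subst hax
        exact hx ha
      rw [show s.length + (x :: l).length = (s ++ [x]).length + l.length by
        simp only [List.length_append, List.length_cons, List.length_nil]; omega]
      rw [ih (s ++ [x]) hs']
      rw [List.append_assoc]
      simp

theorem pv_len_ofList_iff (l : List String) :
    ((PySem.Set.ofList l).length = l.length) ↔ l.Nodup := by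
  have := pv_foldl_add_length_eq_iff l [] (by simp)
  simpa [PySem.Set.ofList, PySem.Set.empty] using this

theorem pv_remove_stars_eq (c : String) :
    remove_stars c = !(c == "*" || c == " ") := by
  unfold remove_stars
  by_cases h1 : c = "*" <;> by_cases h2 : c = " " <;> simp [h1, h2]

theorem pv_rowScan_iff (row : List String) (seen : PySem.Set String) (hs : seen.Nodup) :
    pvRowScan row seen = true ↔ (seen ++ row.filter remove_stars).Nodup := by
  induction row generalizing seen with
  | nil => simpa [pvRowScan] using hs
  | cons ch rest ih =>
    by_cases hg : (ch == "*" || ch == " ") = true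
    · have hf : remove_stars ch = false := by rw [pv_remove_stars_eq, hg]; rfl
      rw [show pvRowScan (ch :: rest) seen = pvRowScan rest seen by simp [pvRowScan, hg]]
      rw [ih seen hs]
      simp [hf]
    · have hf : remove_stars ch = true := by
        rw [pv_remove_stars_eq]; simp only [Bool.eq_false_iff.mpr hg]; rfl
      rw [show pvRowScan (ch :: rest) seen =
            (if PySem.Set.contains seen ch then false
             else pvRowScan rest (PySem.Set.add seen ch)) by simp [pvRowScan, hg]]
      by_cases hc : ch ∈ seen
      · have : PySem.Set.contains seen ch = true := by
          unfold PySem.Set.contains; simp [hc]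
        rw [this]
        simp only [if_true]
        constructor
        · intro h; exact absurd h (by simp)
        · intro h
          rw [List.filter_cons, if_pos hf] at h
          exact absurd rfl (((List.nodup_append.mp h).2.2) ch hc ch List.mem_cons_self)
      · have hcb : PySem.Set.contains seen ch = false := by
          unfold PySem.Set.contains; simp [hc]
        rw [hcb]
        simp only [Bool.false_eq_true, if_false]
        have hadd : PySem.Set.add seen ch = seen ++ [ch] := by
          unfold PySem.Set.add PySem.Set.contains
          simp [hc]
        have hs' : (seen ++ [ch]).Nodup := by
          refine List.Nodup.append hs (by simp) ?_
          intro a ha hax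
          simp only [List.mem_singleton] at hax
          subst hax
          exact hc ha
        rw [hadd, ih (seen ++ [ch]) hs']
        simp [hf, List.append_assoc]

theorem pv_checkRows_eq_all (l : List (List String)) :
    pvCheckRows l = l.all (fun ln => ln.length == (PySem.Set.ofList ln).length) := by
  induction l with
  | nil => rfl
  | cons ln rest ih =>
    by_cases h : ln.length = (PySem.Set.ofList ln).length
    · simp [pvCheckRows, h, ih]
    · simp [pvCheckRows, h]

theorem pv_rowsScan_eq_all (l : List (List String)) :
    pvRowsScan l = l.all (fun row => pvRowScan row PySem.Set.empty) := by
  induction l with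
  | nil => rfl
  | cons row rows ih =>
    have hdef : pvRowsScan (row :: rows)
        = if pvRowScan row PySem.Set.empty then pvRowsScan rows else false := rfl
    rw [hdef]
    simp only [List.all_cons, ← ih]
    cases hv : pvRowScan row PySem.Set.empty <;> simp

theorem pv_row_pointwise (row : List String) :
    ((row.filter remove_stars).length == (PySem.Set.ofList (row.filter remove_stars)).length)
      = pvRowScan row PySem.Set.empty := by
  rw [Bool.eq_iff_iff]
  rw [beq_iff_eq]
  rw [pv_rowScan_iff row PySem.Set.empty (by simp [PySem.Set.empty])]
  rw [show PySem.Set.empty ++ row.filter remove_stars = row.filter remove_stars from by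
    simp [PySem.Set.empty]]
  rw [← pv_len_ofList_iff]
  omega

-- ===== VERDICT (by name: the statement is the Claim_ definition above) =====
theorem repeat_check_spec : Claim_equal_repeat_check := by
  intro lst _
  unfold Spec_repeat_check repeat_check repeat_check_alt
  rw [PySem.List.foldl_append_singleton_eq_map]
  rw [List.nil_append]
  rw [pv_checkRows_eq_all, pv_rowsScan_eq_all, List.all_map]
  congr 1
  funext row
  exact pv_row_pointwise row
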